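-- pv_equiv track=rewrite | github.com/daashikaa/tprg | lab/lab.py | get_series_lens
-- ===== SOURCE A (Python) =====
-- def get_series_lens(lst):
-- 	res = []
-- 	i = 0
-- 	while i < len(lst):
-- 		lenl = 1
-- 		while i + lenl < len(lst) and lst[i + lenl - 1] <= lst[i + lenl]:
-- 			lenl += 1
-- 		res.append(lenl)
-- 		i += lenl
-- 	return res
-- ===== SOURCE B (Python) =====
-- def get_series_lens(lst):
--     if not lst:
--         return []
--     n = len(lst)
--     boundaries = [0] + [i for i in range(1, n) if lst[i - 1] > lst[i]] + [n]
--     return [b2 - b1 for b1, b2 in zip(boundaries, boundaries[1:])]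
-- ===== Notes on version B (the rewrite author's own statement) =====
-- stated objective: alternative
-- what changed: Replaces A's nested while loops that jump the index run-by-run with a boundary-based decomposition: one comprehension collects the positions where a descent breaks a run, and the run lengths are the consecutive differences of the boundary list.
import Mathlib
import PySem

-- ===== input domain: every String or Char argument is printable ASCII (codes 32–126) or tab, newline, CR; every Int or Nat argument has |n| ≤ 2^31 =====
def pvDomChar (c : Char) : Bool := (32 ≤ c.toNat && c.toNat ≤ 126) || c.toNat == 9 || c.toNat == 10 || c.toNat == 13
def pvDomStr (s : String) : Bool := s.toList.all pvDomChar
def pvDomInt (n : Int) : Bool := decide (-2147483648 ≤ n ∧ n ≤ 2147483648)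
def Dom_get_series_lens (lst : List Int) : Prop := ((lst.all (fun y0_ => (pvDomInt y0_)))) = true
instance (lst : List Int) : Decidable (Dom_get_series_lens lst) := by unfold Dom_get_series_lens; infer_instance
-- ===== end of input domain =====

-- B replaces A's nested index-jumping while loops by a boundary list (descent positions) whose
-- consecutive differences are the run lengths; objective: alternative decomposition, same O(n) cost.

-- ===== PORT A =====
-- inner while loop; all indices it reads are in range by the loop guard, so pyGetD is exact here
def pvInner (lst : List Int) (i : Int) : Int → Nat → Int
  | lenl, 0 => lenl
  | lenl, fuel+1 =>
    if i + lenl < (lst.length : Int) ∧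
        PySem.List.pyGetD lst (i + lenl - 1) 0 ≤ PySem.List.pyGetD lst (i + lenl) 0 then
      pvInner lst i (lenl + 1) fuel
    else lenl

-- outer while loop; fuel lst.length(+1) suffices since lenl ≥ 1 each iteration
def pvOuter (lst : List Int) : Int → List Int → Nat → List Int
  | _, res, 0 => res
  | i, res, fuel+1 =>
    if i < (lst.length : Int) then
      let lenl := pvInner lst i 1 lst.length
      pvOuter lst (i + lenl) (res ++ [lenl]) fuel
    else res

def get_series_lens (lst : List Int) : List Int :=
  pvOuter lst 0 [] (lst.length + 1)

-- ===== PORT B =====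
-- boundary positions read lst[i-1], lst[i] with 1 ≤ i < len, so pyGetD is exact here
def get_series_lens_alt (lst : List Int) : List Int :=
  if lst.isEmpty then []
  else
    let n : Int := lst.length
    let boundaries : List Int :=
      [0] ++ (PySem.List.pyRange 1 n 1).filter
        (fun i => decide (PySem.List.pyGetD lst (i - 1) 0 > PySem.List.pyGetD lst i 0)) ++ [n]
    List.zipWith (fun b1 b2 => b2 - b1) boundaries (PySem.List.slice boundaries (some 1) none)

-- ===== PRECONDITION & SPEC =====
def Spec_get_series_lens (lst : List Int) (out : List Int) : Prop := out = get_series_lens_alt lst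
instance (lst : List Int) (out : List Int) : Decidable (Spec_get_series_lens lst out) := by unfold Spec_get_series_lens; infer_instance

-- ===== CLAIM (what is proved, stated in full; the proofs are below) =====
def Claim_equal_get_series_lens : Prop := ∀ (lst : List Int), Dom_get_series_lens lst → Spec_get_series_lens lst (get_series_lens lst)

-- ===== LEMMAS AND PROOFS =====

-- length of the maximal nondecreasing chain continuing x through xs
def splitLen : Int → List Int → Nat
  | _, [] => 0
  | x, y :: ys => if x ≤ y then splitLen y ys + 1 else 0

-- reference run-length function, structural on the list
def runsSpec : List Int → List Int
  | [] => []
  | x :: xs => ((splitLen x xs : Int) + 1) :: runsSpec (xs.drop (splitLen x xs))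
termination_by l => l.length
decreasing_by simp

-- descent positions of s, with s starting at global index j
def breaksFrom : Int → List Int → List Int
  | _, [] => []
  | _, [_] => []
  | j, x :: y :: ys => if y < x then (j+1) :: breaksFrom (j+1) (y :: ys) else breaksFrom (j+1) (y :: ys)

def diffs (l : List Int) : List Int := List.zipWith (fun b1 b2 => b2 - b1) l (l.drop 1)

theorem splitLen_le (x : Int) (xs : List Int) : splitLen x xs ≤ xs.length := by
  induction xs generalizing x with
  | nil => simp [splitLen]
  | cons y ys ih =>
    simp only [splitLen, List.length_cons]
    split
    · have := ih y; omega
    · omega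

theorem pvInner_eq (lst : List Int) (fuel i lenl : Nat) (h1 : 1 ≤ lenl)
    (h2 : i + lenl ≤ lst.length) (h3 : lst.length - (i + lenl) ≤ fuel) :
    pvInner lst (i : Int) (lenl : Int) fuel
      = (lenl : Int) + (splitLen (lst.getD (i + lenl - 1) 0) (lst.drop (i + lenl)) : Int) := by
  induction fuel generalizing lenl with
  | zero =>
    have hn : i + lenl = lst.length := by omega
    simp [pvInner, hn, splitLen]
  | succ fuel ih =>
    simp only [pvInner]
    by_cases h : i + lenl < lst.length
    · have e1 : (i:Int) + (lenl:Int) - 1 = ((i + lenl - 1 : Nat) : Int) := by omega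
      have e2 : (i:Int) + (lenl:Int) = ((i + lenl : Nat) : Int) := by push_cast; ring
      have hdrop : lst.drop (i+lenl) = lst.getD (i+lenl) 0 :: lst.drop (i+lenl+1) := by
        rw [List.drop_eq_getElem_cons h, List.getD_eq_getElem _ _ h]
      rw [e1, e2]
      simp only [PySem.List.pyGetD_natCast]
      by_cases hle : lst.getD (i+lenl-1) 0 ≤ lst.getD (i+lenl) 0
      · rw [if_pos ⟨by exact_mod_cast h, hle⟩]
        have e3 : (lenl:Int) + 1 = ((lenl+1 : Nat) : Int) := by push_cast; ring
        rw [e3, ih (lenl+1) (by omega) (by omega) (by omega)]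
        have e4 : i + (lenl+1) - 1 = i + lenl := by omega
        have e5 : i + (lenl+1) = i + lenl + 1 := by omega
        rw [e4, e5, hdrop]
        simp only [splitLen, if_pos hle]
        push_cast; ring
      · rw [if_neg (by exact fun hc => hle hc.2)]
        rw [hdrop]
        simp only [splitLen, if_neg hle]
        push_cast; ring
    · have hn : i + lenl = lst.length := by omega
      rw [if_neg (by rintro ⟨hc, -⟩; omega)]
      simp [hn, splitLen]

theorem pvOuter_eq (lst : List Int) (fuel : Nat) : ∀ (i : Nat) (res : List Int),
    i ≤ lst.length → lst.length - i < fuel →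
    pvOuter lst (i : Int) res fuel = res ++ runsSpec (lst.drop i) := by
  induction fuel with
  | zero => intro i res h1 h2; omega
  | succ fuel ih =>
    intro i res h1 h2
    simp only [pvOuter]
    by_cases h : i < lst.length
    · rw [if_pos (by exact_mod_cast h)]
      have hc := splitLen_le (lst.getD i 0) (lst.drop (i+1))
      rw [List.length_drop] at hc
      have hin : pvInner lst (i : Int) 1 lst.length
          = 1 + (splitLen (lst.getD i 0) (lst.drop (i+1)) : Int) := by
        simpa using pvInner_eq lst lst.length i 1 le_rfl (by omega) (by omega)
      rw [hin]
      have e : (i:Int) + (1 + (splitLen (lst.getD i 0) (lst.drop (i+1)) : Int))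
          = ((i + 1 + splitLen (lst.getD i 0) (lst.drop (i+1)) : Nat) : Int) := by push_cast; ring
      rw [e, ih _ _ (by omega) (by omega)]
      rw [List.drop_eq_getElem_cons h]
      simp only [runsSpec, List.getD_eq_getElem _ _ h, List.drop_drop, List.append_assoc,
        List.cons_append, List.nil_append]
      rw [Int.add_comm 1]
    · rw [if_neg (by intro hc; exact h (by exact_mod_cast hc))]
      rw [List.drop_eq_nil_of_le (by omega)]
      simp [runsSpec]

theorem filter_eq_breaks (lst : List Int) : ∀ (s : List Int) (k : Nat), lst.drop k = s →
    (PySem.List.pyRange ((k : Int) + 1) (lst.length : Int) 1).filter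
        (fun i => decide (PySem.List.pyGetD lst (i - 1) 0 > PySem.List.pyGetD lst i 0))
      = breaksFrom (k : Int) s := by
  intro s
  induction s with
  | nil =>
    intro k hk
    have hlen : lst.length - k = 0 := by simpa using congrArg List.length hk
    rw [PySem.List.pyRange_one_eq_nil (by omega)]
    simp [breaksFrom]
  | cons x t ih =>
    cases t with
    | nil =>
      intro k hk
      have hlen : lst.length - k = 1 := by simpa using congrArg List.length hk
      rw [PySem.List.pyRange_one_eq_nil (by omega)]
      simp [breaksFrom]
    | cons y ys =>
      intro k hk
      have hlen : lst.length - k = ys.length + 2 := by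
        have := congrArg List.length hk; simp at this; omega
      have e0 : lst.getD k 0 = x := by
        have h0 := (List.getElem?_drop (xs := lst) (i := k) (j := 0))
        rw [hk] at h0
        simp only [Nat.add_zero] at h0
        simp [List.getD_eq_getElem?_getD, ← h0]
      have e1 : lst.getD (k+1) 0 = y := by
        have h0 := (List.getElem?_drop (xs := lst) (i := k) (j := 1))
        rw [hk] at h0
        simp [List.getD_eq_getElem?_getD, ← h0]
      have hd : lst.drop (k+1) = y :: ys := by
        have := congrArg List.tail hk; simpa [List.tail_drop] using this
      rw [PySem.List.pyRange_one_cons (by omega)]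
      rw [List.filter_cons]
      rw [show (k:Int)+1-1 = ((k:Nat):Int) by ring, show (k:Int)+1 = ((k+1:Nat):Int) by push_cast; ring]
      simp only [PySem.List.pyGetD_natCast, e0, e1]
      have ihk := ih (k+1) hd
      push_cast at ihk ⊢
      by_cases hxy : y < x
      · simp [breaksFrom, hxy, ihk]
      · simp [breaksFrom, hxy, ihk]

theorem breaksFrom_split (xs : List Int) : ∀ (x : Int) (j : Int),
    breaksFrom j (x :: xs) =
      if (xs.drop (splitLen x xs)).isEmpty then []
      else (j + (splitLen x xs : Int) + 1)
            :: breaksFrom (j + (splitLen x xs : Int) + 1) (xs.drop (splitLen x xs)) := by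
  induction xs with
  | nil => intro x j; simp [breaksFrom, splitLen]
  | cons y ys ih =>
    intro x j
    by_cases hxy : x ≤ y
    · simp only [splitLen, if_pos hxy]
      rw [show breaksFrom j (x::y::ys) = breaksFrom (j+1) (y::ys) from by
        simp [breaksFrom, not_lt.mpr hxy]]
      rw [ih y (j+1)]
      simp only [List.drop_succ_cons]
      have e : j + 1 + (splitLen y ys : Int) + 1 = j + ((splitLen y ys + 1 : Nat) : Int) + 1 := by
        push_cast; ring
      rw [e]
    · have hyx : y < x := not_le.mp hxy
      simp only [splitLen, if_neg hxy]
      simp [breaksFrom, hyx]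

theorem diffs_cons_cons (a b : Int) (t : List Int) :
    diffs (a :: b :: t) = (b - a) :: diffs (b :: t) := by
  simp [diffs]

theorem diffs_breaks (m : Nat) : ∀ (s : List Int), s.length ≤ m → s ≠ [] → ∀ (j : Int),
    diffs (j :: breaksFrom j s ++ [j + (s.length : Int)]) = runsSpec s := by
  induction m with
  | zero =>
    intro s h hne j
    cases s with
    | nil => exact absurd rfl hne
    | cons x xs => simp at h
  | succ m ih =>
    intro s hlen hne j
    cases s with
    | nil => exact absurd rfl hne
    | cons x xs =>
      rw [runsSpec, breaksFrom_split]
      have hcle := splitLen_le x xs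
      cases hd : xs.drop (splitLen x xs) with
      | nil =>
        have hlen0 : xs.length - splitLen x xs = 0 := by
          have := congrArg List.length hd; simpa using this
        simp [diffs, runsSpec]
        omega
      | cons w ws =>
        have hlw : xs.length - splitLen x xs = ws.length + 1 := by
          have := congrArg List.length hd; simpa using this
        have hlt : (w::ws).length ≤ m := by simp at hlen ⊢; omega
        have ihw := ih (w::ws) hlt (by simp) (j + (splitLen x xs : Int) + 1)
        simp only [List.isEmpty_cons, Bool.false_eq_true, if_false]
        rw [List.cons_append, List.cons_append, diffs_cons_cons]
        have eend : j + ((x::xs).length : Int)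
            = (j + (splitLen x xs : Int) + 1) + (((w::ws).length : Nat) : Int) := by
          simp; omega
        rw [eend]; rw [List.cons_append] at ihw; rw [ihw]
        congr 1
        ring

-- ===== VERDICT (by name: the statement is the Claim_ definition above) =====
theorem get_series_lens_spec : Claim_equal_get_series_lens := by
  intro lst _
  show get_series_lens lst = get_series_lens_alt lst
  have hA : get_series_lens lst = runsSpec lst := by
    have h := pvOuter_eq lst (lst.length + 1) 0 [] (by omega) (by omega)
    simpa [get_series_lens] using h
  rw [hA]
  unfold get_series_lens_alt
  by_cases hnil : lst = []
  · simp [hnil, runsSpec]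
  · rw [if_neg (by simp [hnil])]
    have hb := filter_eq_breaks lst lst 0 (by simp)
    simp only [Nat.cast_zero, zero_add] at hb
    have hdb := diffs_breaks lst.length lst le_rfl hnil 0
    rw [zero_add] at hdb
    simp only [PySem.List.slice_from_one, hb]
    rw [← hdb]
    simp [diffs]
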